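-- pv_equiv track=rewrite | github.com/MrWQ/linkSpider | changeLink.py | changeLink6
-- ===== SOURCE A (Python) =====
-- def removeNull(urlList):
--     urlList = list(urlList)
--     if urlList != []:
--         while '' in urlList:
--             urlList.remove('')
--
-- def changeLink6(urlList):
--     headList1 = []  # 用来记录索引位置到末尾到距离
--     length = len(urlList)
--     count = 0
--     for count in range(0, length):
--         value = urlList[count]
--         value = removeTail(value)
--         if '?' in value:
--             try:
--                 valueList = value.split('?')
--                 value = valueList[1]
--             except:
--                 value = ''
--             if (value == '' or '/' in value):
--                 headList1.append(length - count)  # 记录当前索引位置到末尾到距离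
--                 count = count + 1
--             else:
--                 count = count + 1
--         else:
--             count = count + 1
--
--
--     #     ?/开头的去掉
--     for i in headList1:
--         i = int(i)
--         length = len(urlList)
--         urlList.pop(length - i)
--     removeNull(urlList)  # 去掉空值
--     return urlList
--
-- def removeTail(url):
--     lastValue = url[len(url)-1]
--     if lastValue == '#' or lastValue == '/':
--         url = url[0:len(url)-1]
--     else:
--         pass
--     return url
-- ===== SOURCE B (Python) =====
-- def changeLink6(urlList):
--     kept = []
--     for url in urlList:
--         cs = list(url)
--         if cs[len(cs) - 1] in ('#', '/'):
--             cs.pop()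
--         # one pass over the characters: q becomes the fragment strictly between
--         # the first '?' and the following '?' (or the end); None if there is no '?'
--         q = None
--         for c in cs:
--             if q is None:
--                 if c == '?':
--                     q = []
--             else:
--                 if c == '?':
--                     break
--                 q.append(c)
--         if q is None or (q != [] and '/' not in q):
--             kept.append(url)
--     urlList[:] = kept
--     return urlList
-- ===== Notes on version B (the rewrite author's own statement) =====
-- stated objective: alternative
-- what changed: A records for each bad url its distance to the end, re-walks those distances popping elements by recomputed index, and finally calls a no-op removeNull; B is a single pass that decides each url with a character state machine (tracking the fragment between the first '?' and the next '?' or end) instead of removeTail/split, keeping the url unless that fragment is empty or contains '/', then assigns the kept list back in place.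
import Mathlib
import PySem

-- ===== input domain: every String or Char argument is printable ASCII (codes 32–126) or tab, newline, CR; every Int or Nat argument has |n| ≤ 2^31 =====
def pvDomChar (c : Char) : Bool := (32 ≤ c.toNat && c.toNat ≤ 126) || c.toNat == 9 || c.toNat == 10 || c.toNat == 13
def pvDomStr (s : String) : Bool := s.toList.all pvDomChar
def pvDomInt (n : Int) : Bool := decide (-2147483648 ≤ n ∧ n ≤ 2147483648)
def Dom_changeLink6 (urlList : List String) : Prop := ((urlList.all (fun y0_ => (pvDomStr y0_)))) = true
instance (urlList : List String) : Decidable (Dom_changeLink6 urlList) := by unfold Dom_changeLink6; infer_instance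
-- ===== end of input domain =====

-- B replaces A's two-pass record-distances-then-pop scheme (plus split/removeTail helpers and a
-- no-op removeNull call) by a single pass whose per-url test is a character state machine;
-- equivalence is about the RETURN value (both Pythons also mutate the argument in place to it).


-- ===== PORT A =====
-- module helper removeTail
def removeTailP (url : String) : String :=
  match PySem.Str.pyGet? url (PySem.Str.len url - 1) with
  | some lastValue =>
      if lastValue == '#' || lastValue == '/' then
        PySem.Str.slice url (some 0) (some (PySem.Str.len url - 1))
      else url
  | none => url  -- Python raises IndexError here (url = ""); excluded by Pre_

-- A's per-element test: tail-stripped url has a '?' and its part after the first '?'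
-- (valueList[1], default '' via the except branch) is empty or contains '/'.
def queryBad (value0 : String) : Bool :=
  let value := removeTailP value0
  if PySem.Str.isIn "?" value then
    let valueList := (PySem.Str.split? value "?").getD []   -- sep "?" ≠ "": split? is always some
    let q := PySem.List.pyGetD valueList 1 ""
    q == "" || PySem.Str.isIn "/" q
  else false

-- removeNull(urlList) rebinds a local copy and never changes the argument: a no-op on the result.
def changeLink6 (urlList : List String) : List String :=
  let length : Int := urlList.length
  let headList1 : List Int :=
    (PySem.List.pyRange 0 length 1).foldl
      (fun acc count =>
        if queryBad (PySem.List.pyGetD urlList count "") then acc ++ [length - count]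
        else acc) []
  headList1.foldl
    (fun cur i =>
      match PySem.List.pop? cur ((cur.length : Int) - i) with
      | some r => r.2
      | none => cur) urlList

-- ===== PORT B =====
-- Source B's inner character loop: state q = none before the first '?', some fragment after it;
-- a second '?' stops the loop (Python's break).
def pvScanQ : List Char → Option (List Char) → Option (List Char)
  | [], q => q
  | c :: rest, none => if c == '?' then pvScanQ rest (some []) else pvScanQ rest none
  | c :: rest, some q => if c == '?' then some q else pvScanQ rest (some (q ++ [c]))

-- Source B's loop body for one url: strip a trailing '#'/'/' (cs.pop()), run the scan, keep the url
-- when there was no '?' or the fragment is nonempty and slash-free.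
def pvKeep (url : String) : Bool :=
  let cs0 := url.toList
  let cs := match cs0.getLast? with
    | some l => if l == '#' || l == '/' then cs0.dropLast else cs0
    | none => cs0  -- Source B raises IndexError here (url = ""); excluded by Pre_
  match pvScanQ cs none with
  | none => true
  | some q => decide (q ≠ []) && !(q.contains '/')

def changeLink6_alt (urlList : List String) : List String :=
  urlList.foldl (fun kept url => if pvKeep url then kept ++ [url] else kept) []

-- ===== PRECONDITION & SPEC =====
-- Pre_ excludes lists containing the empty string, on which BOTH Pythons raise IndexError.
def Pre_changeLink6 (urlList : List String) : Prop := ∀ u ∈ urlList, u ≠ ""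
instance (urlList : List String) : Decidable (Pre_changeLink6 urlList) := by unfold Pre_changeLink6; infer_instance
def pvWitness_changeLink6 : List String := ["http://x.com/a?b=1", "a?/", "b#"]

def Spec_changeLink6 (urlList : List String) (out : List String) : Prop := out = changeLink6_alt urlList
instance (urlList : List String) (out : List String) : Decidable (Spec_changeLink6 urlList out) := by unfold Spec_changeLink6; infer_instance

-- ===== CLAIM (what is proved, stated in full; the proofs are below) =====
def Claim_equal_changeLink6 : Prop := ∀ (urlList : List String), Dom_changeLink6 urlList → Pre_changeLink6 urlList → Spec_changeLink6 urlList (changeLink6 urlList)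

-- ===== LEMMAS AND PROOFS =====

-- ---------- A side: the pop loop removes exactly the recorded elements ----------

-- the distances-to-the-end list A's first loop builds, computed structurally
def bd : List String → List Int
  | [] => []
  | x :: xs => (if queryBad x then [((xs.length : Int)) + 1] else []) ++ bd xs

-- one step of A's pop loop
def popStep (cur : List String) (i : Int) : List String :=
  match PySem.List.pop? cur ((cur.length : Int) - i) with
  | some r => r.2
  | none => cur

-- validity of a distance list w.r.t. the current length
def Valid : List Int → Nat → Prop
  | [], _ => True
  | d :: ds, n => 1 ≤ d ∧ d ≤ (n : Int) ∧ Valid ds (n - 1)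

lemma valid_mono : ∀ (ds : List Int) (n m : Nat), Valid ds n → n ≤ m → Valid ds m := by
  intro ds
  induction ds with
  | nil => intro n m _ _; trivial
  | cons d ds ih =>
      intro n m h hnm
      obtain ⟨h1, h2, h3⟩ := h
      exact ⟨h1, by omega, ih _ _ h3 (by omega)⟩

lemma valid_bd : ∀ xs : List String, Valid (bd xs) xs.length := by
  intro xs
  induction xs with
  | nil => trivial
  | cons x xs ih =>
      by_cases h : queryBad x
      · simp only [bd, h, if_pos, List.singleton_append, List.length_cons]
        exact ⟨by omega, by omega, by simpa using ih⟩
      · simp only [bd, h, List.length_cons]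
        exact valid_mono _ _ _ ih (by omega)

lemma bd_eq_nat : ∀ xs : List String,
    ((List.range xs.length).filter (fun k : Nat => queryBad (xs.getD k ""))).map
      (fun k : Nat => ((xs.length : Int) - (k : Int) : Int)) = bd xs := by
  intro xs
  induction xs with
  | nil => rfl
  | cons x xs ih =>
      rw [List.length_cons, List.range_succ_eq_map, List.filter_cons]
      simp only [List.getD_cons_zero, List.filter_map, Function.comp_def,
        Nat.succ_eq_add_one, List.getD_cons_succ, bd]
      by_cases h : queryBad x
      · simp only [h, if_pos, List.map_cons, List.singleton_append]
        refine List.cons_eq_cons.mpr ⟨by push_cast; omega, ?_⟩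
        rw [← ih, List.map_map]
        exact List.map_congr_left (fun a _ => by
          simp only [Function.comp_apply]; push_cast; ring)
      · simp only [h, Bool.false_eq_true, if_neg, not_false_iff, List.nil_append]
        rw [← ih, List.map_map]
        exact List.map_congr_left (fun a _ => by
          simp only [Function.comp_apply]; push_cast; ring)

lemma headList_eq (L : List String) :
    ((PySem.List.pyRange 0 ((L.length : Int)) 1).filter
        (fun c => queryBad (PySem.List.pyGetD L c ""))).map (fun c => (L.length : Int) - c)
      = bd L := by
  rw [PySem.List.pyRange_zero_nat, List.filter_map, List.map_map]
  have hp : (fun c => queryBad (PySem.List.pyGetD L c "")) ∘ (fun k : Nat => (k : Int))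
      = fun k : Nat => queryBad (L.getD k "") := by
    funext k; simp [PySem.List.pyGetD_natCast]
  rw [hp]
  have hf : (fun c : Int => (L.length : Int) - c) ∘ (fun k : Nat => (k : Int))
      = fun k : Nat => (L.length : Int) - (k : Int) := by
    funext k; simp
  rw [hf]
  exact bd_eq_nat L

lemma popLoop_keep : ∀ (ds : List Int) (x : String) (xs : List String), Valid ds xs.length →
    ds.foldl popStep (x :: xs) = x :: ds.foldl popStep xs := by
  intro ds
  induction ds with
  | nil => intro x xs _; rfl
  | cons d ds ih =>
      intro x xs hv
      obtain ⟨h1, h2, h3⟩ := hv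
      set n := xs.length with hn
      obtain ⟨j, hj, hjlt⟩ : ∃ j : Nat, ((n : Int) - d) = (j : Int) ∧ j < n := by
        refine ⟨((n : Int) - d).toNat, by omega, by omega⟩
      have hstep1 : popStep (x :: xs) d = x :: xs.eraseIdx j := by
        unfold popStep
        have hidx : ((x :: xs).length : Int) - d = ((j + 1 : Nat) : Int) := by
          simp only [List.length_cons]; push_cast; omega
        rw [hidx, PySem.List.pop?_natCast (x :: xs) (j + 1) (by simpa using hjlt)]
        simp
      have hstep2 : popStep xs d = xs.eraseIdx j := by
        unfold popStep
        rw [hj, PySem.List.pop?_natCast xs j hjlt]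
      have hlen : (xs.eraseIdx j).length = n - 1 := by
        rw [List.length_eraseIdx_of_lt hjlt]
      rw [List.foldl_cons, List.foldl_cons, hstep1, hstep2]
      exact ih x (xs.eraseIdx j) (by rw [hlen]; exact h3)

lemma popLoop_bd : ∀ xs : List String,
    (bd xs).foldl popStep xs = xs.filter (fun u => !queryBad u) := by
  intro xs
  induction xs with
  | nil => rfl
  | cons x xs ih =>
      by_cases h : queryBad x
      · simp only [bd, h, if_pos, List.singleton_append, List.foldl_cons, List.filter_cons,
          Bool.not_true, Bool.false_eq_true, if_neg, not_false_iff]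
        have hstep : popStep (x :: xs) ((xs.length : Int) + 1) = xs := by
          unfold popStep
          have hidx : ((x :: xs).length : Int) - ((xs.length : Int) + 1) = 0 := by
            simp only [List.length_cons]; push_cast; ring
          rw [hidx, PySem.List.pop?_zero_cons]
        rw [hstep, ih]
      · simp only [bd, h, if_neg, Bool.false_eq_true, not_false_iff, List.nil_append]
        rw [popLoop_keep (bd xs) x xs (valid_bd xs), ih]
        simp [h]

lemma changeLink6_eq_filter (L : List String) :
    changeLink6 L = L.filter (fun u => !queryBad u) := by
  have h1 : changeLink6 L = (bd L).foldl popStep L := by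
    show ((PySem.List.pyRange 0 ((L.length : Int)) 1).foldl
        (fun acc count =>
          if queryBad (PySem.List.pyGetD L count "") then acc ++ [(L.length : Int) - count]
          else acc) []).foldl popStep L = (bd L).foldl popStep L
    rw [PySem.List.foldl_append_if (fun count => queryBad (PySem.List.pyGetD L count ""))
          (fun count => (L.length : Int) - count), List.nil_append, headList_eq L]
  rw [h1, popLoop_bd]

-- ---------- B side: the fold is a filter ----------

lemma changeLink6_alt_eq_filter (L : List String) :
    changeLink6_alt L = L.filter pvKeep := by
  show L.foldl (fun kept url => if pvKeep url then kept ++ [url] else kept) [] = _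
  simpa using PySem.List.foldl_append_if pvKeep id L []

-- ---------- pointwise: B's state machine decides exactly A's split-based test ----------

-- the structural splitter: spl c cs = PySem.Chars.splitOn cs [c]
def spl (c : Char) : List Char → List (List Char)
  | [] => [[]]
  | a :: rest => if a = c then [] :: spl c rest else (spl c rest).modifyHead (a :: ·)

lemma splitOn_go_spec (c : Char) : ∀ (fuel : Nat) (t cur : List Char) (acc : List (List Char)),
    t.length < fuel →
    PySem.Chars.splitOn.go [c] fuel t cur acc
      = acc.reverse ++ (spl c t).modifyHead (cur.reverse ++ ·) := by
  intro fuel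
  induction fuel with
  | zero => intro t cur acc h; omega
  | succ fuel ih =>
      intro t cur acc h
      cases t with
      | nil =>
          simp [PySem.Chars.splitOn.go, spl]
      | cons a rest =>
          rw [PySem.Chars.splitOn.go]
          by_cases hac : a = c
          · subst hac
            have hpre : [a].isPrefixOf (a :: rest) = true := by simp [List.isPrefixOf]
            rw [if_pos hpre]
            simp only [List.length_cons] at h
            rw [show List.drop [a].length (a :: rest) = rest from rfl]
            rw [ih rest [] _ (by omega)]
            cases hsp : spl a rest <;> simp [spl, List.modifyHead, hsp]
          · have hpre : [c].isPrefixOf (a :: rest) = false := by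
              simp [List.isPrefixOf]; exact fun hx => absurd hx.symm hac
            rw [if_neg (by simp [hpre])]
            simp only [List.length_cons] at h
            rw [ih rest (a :: cur) acc (by omega)]
            simp only [spl, if_neg hac, List.modifyHead_modifyHead]
            congr 1
            cases spl c rest with
            | nil => rfl
            | cons y ys => simp [List.modifyHead]

lemma splitOn_eq_spl (c : Char) (t : List Char) :
    PySem.Chars.splitOn t [c] = spl c t := by
  show PySem.Chars.splitOn.go [c] (t.length + 1) t [] [] = _
  rw [splitOn_go_spec c (t.length + 1) t [] [] (by omega)]
  cases spl c t with
  | nil => rfl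
  | cons y ys => simp [List.modifyHead]

lemma spl_head (c : Char) : ∀ t : List Char,
    (spl c t).head? = some (t.takeWhile (· ≠ c)) := by
  intro t
  induction t with
  | nil => rfl
  | cons a rest ih =>
      by_cases hac : a = c
      · subst hac; simp [spl]
      · simp [spl, hac, List.head?_modifyHead, ih]

lemma spl_idx1 (c : Char) : ∀ t : List Char, c ∈ t →
    (spl c t)[1]? = some (((t.dropWhile (· ≠ c)).tail).takeWhile (· ≠ c)) := by
  intro t
  induction t with
  | nil => intro h; cases h
  | cons a rest ih =>
      intro hmem
      by_cases hac : a = c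
      · subst hac
        rw [show spl a (a :: rest) = [] :: spl a rest from by simp [spl]]
        rw [show (a :: rest).dropWhile (· ≠ a) = a :: rest from by simp]
        simp only [List.getElem?_cons_succ, List.tail_cons]
        rw [← List.head?_eq_getElem?]
        exact spl_head a rest
      · have hmem' : c ∈ rest := by
          cases hmem with
          | head => exact absurd rfl hac
          | tail _ h => exact h
        rw [show spl c (a :: rest) = (spl c rest).modifyHead (a :: ·) from by simp [spl, hac]]
        rw [show (a :: rest).dropWhile (· ≠ c) = rest.dropWhile (· ≠ c) from by
          simp [hac]]
        rw [List.getElem?_modifyHead_succ]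
        exact ih hmem'

lemma scanQ_some : ∀ (t q : List Char),
    pvScanQ t (some q) = some (q ++ t.takeWhile (· ≠ '?')) := by
  intro t
  induction t with
  | nil => intro q; simp [pvScanQ]
  | cons a rest ih =>
      intro q
      by_cases ha : a = '?'
      · subst ha; simp [pvScanQ]
      · simp [pvScanQ, ha, ih]

lemma scanQ_none : ∀ t : List Char,
    pvScanQ t none
      = if '?' ∈ t then some (((t.dropWhile (· ≠ '?')).tail).takeWhile (· ≠ '?')) else none := by
  intro t
  induction t with
  | nil => rfl
  | cons a rest ih =>
      by_cases ha : a = '?'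
      · subst ha
        rw [show pvScanQ ('?' :: rest) none = pvScanQ rest (some []) from by simp [pvScanQ]]
        have hmem : '?' ∈ '?' :: rest := by simp
        rw [scanQ_some, if_pos hmem]
        rw [show ('?' :: rest).dropWhile (· ≠ '?') = '?' :: rest from by simp]
        simp
      · rw [show pvScanQ (a :: rest) none = pvScanQ rest none from by simp [pvScanQ, ha]]
        rw [show (a :: rest).dropWhile (· ≠ '?') = rest.dropWhile (· ≠ '?') from by
          simp [ha]]
        rw [ih]
        by_cases hm : '?' ∈ rest
        · rw [if_pos hm, if_pos (List.mem_cons_of_mem _ hm)]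
        · rw [if_neg hm, if_neg (by
            intro hx
            rcases List.mem_cons.mp hx with hh | hh
            · exact ha hh.symm
            · exact hm hh)]

lemma isIn_singleton (c : Char) (s : List Char) :
    PySem.Chars.isIn [c] s = decide (c ∈ s) := by
  by_cases h : c ∈ s
  · simp only [h, decide_true]
    exact (PySem.Chars.isIn_iff_infix [c] s).mpr ((List.singleton_infix_iff c s).mpr h)
  · simp only [h, decide_false]
    exact (PySem.Chars.isIn_eq_false_iff [c] s).mpr
      (fun hx => h ((List.singleton_infix_iff c s).mp hx))

-- A's test, expressed over the stripped character list
lemma queryBad_chars (t : List Char) :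
    queryBad (String.ofList t) =
      (if '?' ∈ (removeTailP (String.ofList t)).toList then
        (let q := PySem.List.pyGetD (spl '?' (removeTailP (String.ofList t)).toList) 1 []
         decide (q = []) || decide ('/' ∈ q))
       else false) := by
  show (if PySem.Str.isIn "?" (removeTailP (String.ofList t)) then _ else false) = _
  set v := removeTailP (String.ofList t) with hv
  have hIn : PySem.Str.isIn "?" v = decide ('?' ∈ v.toList) := by
    rw [show PySem.Str.isIn "?" v = PySem.Chars.isIn "?".toList v.toList from by
      simp [PySem.Str.isIn_eq]]
    rw [show "?".toList = ['?'] from rfl, isIn_singleton]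
  rw [hIn]
  by_cases hm : '?' ∈ v.toList
  · rw [if_pos (by simpa using hm), if_pos hm]
    have hsplit : (PySem.Str.split? v "?").getD []
        = (PySem.Chars.splitOn v.toList ['?']).map String.ofList := by
      show (Option.map _ (PySem.Chars.split? v.toList "?".toList)).getD [] = _
      rw [show "?".toList = ['?'] from rfl]
      rw [show PySem.Chars.split? v.toList ['?'] = some (PySem.Chars.splitOn v.toList ['?']) from
        by simp [PySem.Chars.split?]]
      rfl
    rw [hsplit, splitOn_eq_spl]
    have hget : PySem.List.pyGetD ((spl '?' v.toList).map String.ofList) 1 ""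
        = String.ofList (PySem.List.pyGetD (spl '?' v.toList) 1 []) := by
      rw [show ("" : String) = String.ofList [] from rfl, PySem.List.pyGetD_map]
    rw [hget]
    set q := PySem.List.pyGetD (spl '?' v.toList) 1 [] with hq
    have h1 : (String.ofList q == "") = decide (q = []) := by
      rcases q with _ | ⟨c, cs⟩ <;> simp [String.ofList_eq_empty_iff]
    have h2 : PySem.Str.isIn "/" (String.ofList q) = decide ('/' ∈ q) := by
      rw [show PySem.Str.isIn "/" (String.ofList q)
          = PySem.Chars.isIn "/".toList (String.ofList q).toList from by simp [PySem.Str.isIn_eq]]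
      rw [show "/".toList = ['/'] from rfl, String.toList_ofList, isIn_singleton]
    rw [h1, h2]
  · rw [if_neg (by simpa using hm), if_neg hm]

-- removeTail's result, as a character list (url nonempty)
lemma removeTail_toList (url : String) (h : url.toList ≠ []) :
    (removeTailP url).toList =
      (if (url.toList.getLast h) = '#' ∨ (url.toList.getLast h) = '/'
       then url.toList.dropLast else url.toList) := by
  have hlen : 1 ≤ url.toList.length := by
    cases hx : url.toList with
    | nil => exact absurd hx h
    | cons a as => simp
  have hidx : PySem.Str.len url - 1 = ((url.toList.length - 1 : Nat) : Int) := by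
    rw [PySem.Str.len_eq]; omega
  have hget : PySem.Str.pyGet? url (PySem.Str.len url - 1)
      = some (url.toList.getLast h) := by
    rw [hidx, PySem.Str.pyGet?_natCast, List.getLast?_eq_getElem?.symm,
      List.getLast?_eq_getLast_of_ne_nil h]
  show (match PySem.Str.pyGet? url (PySem.Str.len url - 1) with
    | some lastValue => if lastValue == '#' || lastValue == '/'
        then PySem.Str.slice url (some 0) (some (PySem.Str.len url - 1)) else url
    | none => url).toList = _
  rw [hget]
  by_cases hc : (url.toList.getLast h) = '#' ∨ (url.toList.getLast h) = '/'
  · rw [if_pos hc]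
    simp only [show ((url.toList.getLast h == '#' || url.toList.getLast h == '/') = true) from
      by rcases hc with hc | hc <;> simp [hc]]
    simp only [if_pos]
    rw [PySem.Str.toList_slice, PySem.Chars.slice_eq_listSlice, hidx,
      PySem.List.slice_zero_start, PySem.List.slice_to _ (by positivity)]
    simp [List.dropLast_eq_take]
  · rw [if_neg hc]
    have : (url.toList.getLast h == '#' || url.toList.getLast h == '/') = false := by
      rcases not_or.mp hc with ⟨h1, h2⟩; simp [h1, h2]
    simp [this]

-- the per-url tests agree on every nonempty url
lemma keep_eq_not_bad (url : String) (h : url ≠ "") : pvKeep url = !queryBad url := by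
  have hl : url.toList ≠ [] := by
    intro hn; apply h; exact String.toList_inj.mp (by simpa using hn)
  have hurl : url = String.ofList url.toList := by
    exact (String.ofList_toList).symm
  set t := (removeTailP url).toList with ht
  have hB : pvKeep url
      = (match pvScanQ t none with
         | none => true
         | some q => decide (q ≠ []) && !(q.contains '/')) := by
    show (match pvScanQ (match url.toList.getLast? with
      | some l => if l == '#' || l == '/' then url.toList.dropLast else url.toList
      | none => url.toList) none with
      | none => true
      | some q => decide (q ≠ []) && !(q.contains '/')) = _
    congr 1
    rw [List.getLast?_eq_getLast_of_ne_nil hl, ht, removeTail_toList url hl]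
    by_cases hc : (url.toList.getLast hl) = '#' ∨ (url.toList.getLast hl) = '/'
    · rw [if_pos hc]
      rcases hc with hc | hc <;> simp [hc]
    · rw [if_neg hc]
      rcases not_or.mp hc with ⟨h1, h2⟩; simp [h1, h2]
  have hA : queryBad url
      = (if '?' ∈ t then
          (let q := PySem.List.pyGetD (spl '?' t) 1 []
           decide (q = []) || decide ('/' ∈ q))
         else false) := by
    conv_lhs => rw [hurl]
    rw [queryBad_chars]
    rw [show removeTailP (String.ofList url.toList) = removeTailP url from by rw [← hurl]]
  rw [hB, hA, scanQ_none]
  by_cases hm : '?' ∈ t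
  · rw [if_pos hm, if_pos hm]
    have hq : PySem.List.pyGetD (spl '?' t) 1 []
        = ((t.dropWhile (· ≠ '?')).tail).takeWhile (· ≠ '?') := by
      rw [PySem.List.pyGetD_ofNat', List.getD_eq_getElem?_getD, spl_idx1 '?' t hm]
      rfl
    rw [hq]
    set q := ((t.dropWhile (· ≠ '?')).tail).takeWhile (· ≠ '?') with hqdef
    simp only [Bool.not_or, decide_not]
    congr 1
    simp
  · rw [if_neg hm, if_neg hm]
    rfl

-- ===== VERDICT (by name: the statement is the Claim_ definition above) =====
theorem changeLink6_spec : Claim_equal_changeLink6 := by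
  intro L _ hpre
  show changeLink6 L = changeLink6_alt L
  rw [changeLink6_eq_filter, changeLink6_alt_eq_filter]
  exact List.filter_congr (fun u hu => (keep_eq_not_bad u (hpre u hu)).symm)
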